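-- pv_equiv track=rewrite | github.com/OnYyon/EGE | task15/types/task3.py | check
-- ===== SOURCE A (Python) =====
-- def check(a):
--     for x in range(1, 100000):
--         f1 = (x % 6 == 0)
--         f2 = (x % 10 == 0)
--         f3 = ((x + a) > 121)
--         if ((f1 <= (not f2)) or f3) != 1:
--             return False
--     return True
-- ===== SOURCE B (Python) =====
-- def check(a):
--     # Closed form: the loop's body can only fail when x % 30 == 0 (then
--     # f1 <= not f2 is False) and x + a <= 121; the smallest such x in the
--     # range is 30, so the predicate holds for all x iff 30 + a > 121.
--     return a >= 92
-- ===== Notes on version B (the rewrite author's own statement) =====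
-- stated objective: faster
-- what changed: Replaced the 100000-iteration loop by the closed form a >= 92 (the body fails exactly when x % 30 == 0 and x + a <= 121, and the smallest such x is 30).
import Mathlib
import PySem

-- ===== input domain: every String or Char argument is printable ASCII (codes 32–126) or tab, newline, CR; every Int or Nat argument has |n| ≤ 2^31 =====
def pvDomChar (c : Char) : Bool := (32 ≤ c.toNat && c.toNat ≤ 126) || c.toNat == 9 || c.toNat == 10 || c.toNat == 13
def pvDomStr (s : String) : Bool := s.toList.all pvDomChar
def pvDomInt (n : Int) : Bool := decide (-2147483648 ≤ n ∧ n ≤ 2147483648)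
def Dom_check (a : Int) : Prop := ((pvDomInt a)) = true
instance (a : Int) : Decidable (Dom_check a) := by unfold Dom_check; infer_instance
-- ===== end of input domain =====

-- ===== PORT A =====
-- the early-return for-loop, transcribed as structural recursion over range(1, 100000)
-- (Python's `f1 <= (not f2)` on bools is implication, ported as `!f1 || !f2`;
--  `… != 1` negates that bool)
def checkLoop (a : Int) : List Int → Bool
  | [] => true
  | x :: xs =>
      let f1 := decide (x % 6 == 0)
      let f2 := decide (x % 10 == 0)
      let f3 := decide (x + a > 121)
      if (((!f1 || !f2) || f3) != true) then false else checkLoop a xs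

def check (a : Int) : Bool := checkLoop a (PySem.List.pyRange 1 100000 1)

-- ===== PORT B =====
def check_alt (a : Int) : Bool := decide (a ≥ 92)

-- ===== PRECONDITION & SPEC =====
def Spec_check (a : Int) (out : Bool) : Prop := out = check_alt a
instance (a : Int) (out : Bool) : Decidable (Spec_check a out) := by unfold Spec_check; infer_instance

-- ===== CLAIM (what is proved, stated in full; the proofs are below) =====
def Claim_equal_check : Prop := ∀ (a : Int), Dom_check a → Spec_check a (check a)

-- ===== LEMMAS AND PROOFS =====

-- ===== VERDICT (by name: the statement is the Claim_ definition above) =====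
theorem checkLoop_eq_all (a : Int) (xs : List Int) :
    checkLoop a xs = xs.all (fun x =>
      ((!decide (x % 6 == 0) || !decide (x % 10 == 0)) || decide (x + a > 121))) := by
  induction xs with
  | nil => rfl
  | cons x xs ih =>
      simp only [checkLoop, List.all_cons]
      cases hb : ((!decide (x % 6 == 0) || !decide (x % 10 == 0)) || decide (x + a > 121))
      · simp [hb]
      · simp [hb, ih]

theorem check_spec : Claim_equal_check := by
  intro a _
  unfold Spec_check check check_alt
  rw [checkLoop_eq_all]
  by_cases h : a ≥ 92
  · rw [List.all_eq_true.mpr, decide_eq_true h]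
    intro x hx
    rw [PySem.List.mem_pyRange_one] at hx
    by_cases h30 : x % 30 = 0
    · have hx30 : 30 ≤ x := by omega
      simp only [Bool.or_eq_true, decide_eq_true_eq]
      right; omega
    · have : ¬ (x % 6 = 0 ∧ x % 10 = 0) := by omega
      simp only [Bool.or_eq_true, Bool.not_eq_eq_eq_not, Bool.not_true, decide_eq_false_iff_not,
        beq_iff_eq, decide_eq_true_eq]
      omega
  · have h30 : (30 : Int) ∈ PySem.List.pyRange 1 100000 1 := by
      rw [PySem.List.mem_pyRange_one]; omega
    rw [decide_eq_false h]
    refine List.all_eq_false.mpr ⟨30, h30, ?_⟩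
    simp; omega
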